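-- pv_equiv track=rewrite | github.com/Dyedds/Algorithm | 프로그래머스/0/181928. 이어 붙인 수/이어 붙인 수.py | solution
-- ===== SOURCE A (Python) =====
-- def solution(num_list):
--     a = 0
--     b = 0
--     for i in num_list:
--         if i % 2 == 0:
--             b = b * 10 + i
--         else:
--             a = a * 10 + i
--
--     answer = a + b
--     return answer
-- ===== SOURCE B (Python) =====
-- def solution(num_list):
--     total = 0
--     pow_even = 1
--     pow_odd = 1
--     for i in reversed(num_list):
--         if i % 2 == 0:
--             total += i * pow_even
--             pow_even *= 10
--         else:
--             total += i * pow_odd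
--             pow_odd *= 10
--     return total
-- ===== Notes on version B (the rewrite author's own statement) =====
-- stated objective: alternative
-- what changed: Replaces A's forward Horner recurrences (acc*10+i) over two accumulators with a single backward pass computing a positional-weight sum: each element contributes i times a per-parity power of ten maintained while walking the list in reverse.
import Mathlib
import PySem

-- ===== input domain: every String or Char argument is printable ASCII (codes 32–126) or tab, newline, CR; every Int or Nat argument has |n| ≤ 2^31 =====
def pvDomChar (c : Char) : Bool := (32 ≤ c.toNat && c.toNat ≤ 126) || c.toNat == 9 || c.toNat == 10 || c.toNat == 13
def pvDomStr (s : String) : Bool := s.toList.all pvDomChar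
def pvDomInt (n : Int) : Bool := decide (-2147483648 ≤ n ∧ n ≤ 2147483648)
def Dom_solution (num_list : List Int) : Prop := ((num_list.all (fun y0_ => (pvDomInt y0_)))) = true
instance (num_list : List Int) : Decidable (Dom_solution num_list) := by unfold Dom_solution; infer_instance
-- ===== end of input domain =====

-- B replaces A's forward Horner recurrences over two accumulators with a single
-- backward pass summing i * (per-parity power of ten) into one total (objective: alternative).

-- ===== PORT A =====
-- one forward pass, two Horner accumulators updated by a branch inside the loop
def solution (num_list : List Int) : Int :=
  let st := num_list.foldl
    (fun (ab : Int × Int) i =>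
      if PySem.Int.mod i 2 = 0 then (ab.1, ab.2 * 10 + i) else (ab.1 * 10 + i, ab.2))
    (0, 0)
  st.1 + st.2

-- ===== PORT B =====
-- backward pass; state = (total, pow_even, pow_odd)
def pvStepB (s : Int × Int × Int) (i : Int) : Int × Int × Int :=
  if PySem.Int.mod i 2 = 0 then (s.1 + i * s.2.1, s.2.1 * 10, s.2.2)
  else (s.1 + i * s.2.2, s.2.1, s.2.2 * 10)

def solution_alt (num_list : List Int) : Int :=
  (num_list.reverse.foldl pvStepB (0, 1, 1)).1

-- ===== PRECONDITION & SPEC =====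
def Spec_solution (num_list : List Int) (out : Int) : Prop := out = solution_alt num_list
instance (num_list : List Int) (out : Int) : Decidable (Spec_solution num_list out) := by unfold Spec_solution; infer_instance

-- ===== CLAIM (what is proved, stated in full; the proofs are below) =====
def Claim_equal_solution : Prop := ∀ (num_list : List Int), Dom_solution num_list → Spec_solution num_list (solution num_list)

-- ===== LEMMAS AND PROOFS =====
def pvHorner (acc d : Int) : Int := acc * 10 + d

-- A's pair fold computes the two Horner values of the parity-filtered sublists.
theorem solution_pair (l : List Int) : ∀ (a b : Int),
    l.foldl
      (fun (ab : Int × Int) i =>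
        if PySem.Int.mod i 2 = 0 then (ab.1, ab.2 * 10 + i) else (ab.1 * 10 + i, ab.2))
      (a, b)
    = ((l.filter (fun i => ¬ (PySem.Int.mod i 2 = 0))).foldl pvHorner a,
       (l.filter (fun i => PySem.Int.mod i 2 = 0)).foldl pvHorner b) := by
  induction l with
  | nil => intro a b; simp
  | cons x xs ih =>
      intro a b
      by_cases h : PySem.Int.mod x 2 = 0
      · rw [List.foldl_cons, if_pos h, List.filter_cons, List.filter_cons]
        simp only [h, decide_true, not_true_eq_false, decide_false]
        rw [ih]; rfl
      · rw [List.foldl_cons, if_neg h, List.filter_cons, List.filter_cons]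
        simp only [h, decide_false, not_false_eq_true, decide_true]
        rw [ih]; rfl

-- B's backward weighted fold, read as folding a list r = l.reverse, computes
-- t + Horner(odds of r.reverse)·po + Horner(evens of r.reverse)·pe.
theorem stepB_inv (r : List Int) : ∀ (t pe po : Int),
    (r.foldl pvStepB (t, pe, po)).1
    = t + ((r.reverse.filter (fun i => ¬ (PySem.Int.mod i 2 = 0))).foldl pvHorner 0) * po
        + ((r.reverse.filter (fun i => PySem.Int.mod i 2 = 0)).foldl pvHorner 0) * pe := by
  induction r with
  | nil => intro t pe po; simp
  | cons x rs ih =>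
      intro t pe po
      have hfe : ∀ (ys : List Int) (c : Int),
          (ys ++ [x]).foldl pvHorner c = (ys.foldl pvHorner c) * 10 + x := by
        intro ys c; rw [List.foldl_append]; rfl
      by_cases h : PySem.Int.mod x 2 = 0
      · rw [List.foldl_cons]
        have : pvStepB (t, pe, po) x = (t + x * pe, pe * 10, po) := by
          simp only [pvStepB, if_pos h]
        rw [this, ih]
        rw [List.reverse_cons, List.filter_append, List.filter_append]
        simp only [List.filter_cons, h, decide_true, not_true_eq_false, decide_false,
          Bool.false_eq_true, if_true, if_false, List.filter_nil, List.append_nil]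
        rw [hfe]
        ring
      · rw [List.foldl_cons]
        have : pvStepB (t, pe, po) x = (t + x * po, pe, po * 10) := by
          simp only [pvStepB, if_neg h]
        rw [this, ih]
        rw [List.reverse_cons, List.filter_append, List.filter_append]
        simp only [List.filter_cons, h, decide_false, not_false_eq_true, decide_true,
          Bool.false_eq_true, if_true, if_false, List.filter_nil, List.append_nil]
        rw [hfe]
        ring

-- ===== VERDICT (by name: the statement is the Claim_ definition above) =====
theorem solution_spec : Claim_equal_solution := by
  intro l _
  show solution l = solution_alt l
  unfold solution solution_alt
  rw [solution_pair, stepB_inv, List.reverse_reverse]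
  ring
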